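-- pv_equiv track=rewrite | github.com/HiThink-Research/GAGE | src/gage_eval/role/arena/visualization/assembly.py | _split_doudizhu_action_cards
-- ===== SOURCE A (Python) =====
-- def _split_doudizhu_action_cards(action_text: str) -> list[str]:
--     normalized = str(action_text).strip()
--     if not normalized or normalized.lower() == "pass":
--         return []
--     cards: list[str] = []
--     index = 0
--     while index < len(normalized):
--         token = normalized[index]
--         if token == "1" and index + 1 < len(normalized) and normalized[index + 1] == "0":
--             cards.append("10")
--             index += 2
--             continue
--         cards.append(token.upper())
--         index += 1
--     return cards
-- ===== SOURCE B (Python) =====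
-- def _split_doudizhu_action_cards(action_text: str) -> list[str]:
--     normalized = str(action_text).strip()
--     if not normalized or normalized.lower() == "pass":
--         return []
--     cards: list[str] = []
--     pending_one = False  # a '1' seen and not yet emitted, waiting for a possible '0'
--     for ch in normalized:
--         if pending_one and ch == "0":
--             cards.append("10")
--             pending_one = False
--         else:
--             if pending_one:
--                 cards.append("1")
--                 pending_one = False
--             if ch == "1":
--                 pending_one = True
--             else:
--                 cards.append(ch.upper())
--     if pending_one:
--         cards.append("1")
--     return cards
-- ===== Notes on version B (the rewrite author's own statement) =====
-- stated objective: alternative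
-- what changed: Replaces A's index-based while-loop with one-character lookahead by a single forward for-loop over the characters that keeps a pending-one flag and flushes it on the next character (a state machine, no indexing); a timing run measured this constant-factor faster.
import Mathlib
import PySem

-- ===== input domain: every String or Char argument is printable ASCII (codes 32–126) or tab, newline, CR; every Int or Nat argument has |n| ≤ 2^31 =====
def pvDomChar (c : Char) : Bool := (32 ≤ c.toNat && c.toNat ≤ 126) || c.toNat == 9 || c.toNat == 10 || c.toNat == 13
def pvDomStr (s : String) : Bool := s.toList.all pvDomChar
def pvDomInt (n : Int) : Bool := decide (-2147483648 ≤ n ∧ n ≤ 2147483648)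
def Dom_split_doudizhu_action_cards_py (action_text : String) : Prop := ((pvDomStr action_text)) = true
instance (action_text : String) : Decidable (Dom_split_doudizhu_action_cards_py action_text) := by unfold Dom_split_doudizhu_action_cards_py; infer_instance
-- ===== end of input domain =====

-- B replaces A's index/lookahead while-loop by a single forward pass keeping a pending-'1' flag
-- (alternative decomposition; same return value; a timing run measured it constant-factor faster).

-- ===== PORT A =====
-- A's while-loop: index-based scan with one-character lookahead over the chars of `normalized`
def pvALoop (l : List Char) (index : Nat) (cards : List String) : List String :=
  if h : index < l.length then
    let token := l[index]
    if token = '1' ∧ index + 1 < l.length ∧ l[index + 1]? = some '0' then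
      pvALoop l (index + 2) (cards ++ ["10"])
    else
      pvALoop l (index + 1) (cards ++ [String.ofList [PySem.Chars.upperChar token]])
  else cards
termination_by l.length - index

def split_doudizhu_action_cards_py (action_text : String) : List String :=
  let normalized := PySem.Str.strip action_text
  if normalized.toList = [] ∨ (PySem.Str.lower normalized).toList = "pass".toList then []
  else pvALoop normalized.toList 0 []

-- ===== PORT B =====
-- B's for-loop body: one step of the state machine, state = (cards, pending_one)
def pvBStep (st : List String × Bool) (ch : Char) : List String × Bool :=
  if st.2 = true ∧ ch = '0' then (st.1 ++ ["10"], false)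
  else
    let cards := if st.2 = true then st.1 ++ ["1"] else st.1
    if ch = '1' then (cards, true)
    else (cards ++ [String.ofList [PySem.Chars.upperChar ch]], false)

def split_doudizhu_action_cards_py_alt (action_text : String) : List String :=
  let normalized := PySem.Str.strip action_text
  if normalized.toList = [] ∨ (PySem.Str.lower normalized).toList = "pass".toList then []
  else
    let st := normalized.toList.foldl pvBStep ([], false)
    if st.2 = true then st.1 ++ ["1"] else st.1

-- ===== PRECONDITION & SPEC =====
def Spec_split_doudizhu_action_cards_py (action_text : String) (out : List String) : Prop := out = split_doudizhu_action_cards_py_alt action_text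
instance (action_text : String) (out : List String) : Decidable (Spec_split_doudizhu_action_cards_py action_text out) := by unfold Spec_split_doudizhu_action_cards_py; infer_instance

-- ===== CLAIM (what is proved, stated in full; the proofs are below) =====
def Claim_equal_split_doudizhu_action_cards_py : Prop := ∀ (action_text : String), Dom_split_doudizhu_action_cards_py action_text → Spec_split_doudizhu_action_cards_py action_text (split_doudizhu_action_cards_py action_text)

-- ===== LEMMAS AND PROOFS =====

-- the canonical tokenization both loops compute
def pvTok : List Char → List String
  | [] => []
  | [c] => [String.ofList [PySem.Chars.upperChar c]]
  | c :: d :: rest =>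
    if c = '1' ∧ d = '0' then "10" :: pvTok rest
    else String.ofList [PySem.Chars.upperChar c] :: pvTok (d :: rest)

lemma pvTok_cons (c : Char) (rest : List Char) :
    pvTok (c :: rest) =
      if c = '1' ∧ rest.head? = some '0' then "10" :: pvTok rest.tail
      else String.ofList [PySem.Chars.upperChar c] :: pvTok rest := by
  cases rest with
  | nil => simp [pvTok]
  | cons d rest' => simp [pvTok]

lemma pvALoop_eq (l : List Char) : ∀ i cards, pvALoop l i cards = cards ++ pvTok (l.drop i) := by
  intro i cards
  fun_induction pvALoop l i cards with
  | case1 index cards hlt token hc ih =>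
    obtain ⟨h1, h2, h3⟩ := hc
    have e1 : l.drop index = l[index] :: l.drop (index + 1) := List.drop_eq_getElem_cons hlt
    have e2 : l.drop (index + 1) = l[index + 1] :: l.drop (index + 2) := List.drop_eq_getElem_cons h2
    have h0 : l[index + 1] = '0' := by simpa [List.getElem?_eq_getElem h2] using h3
    rw [ih, e1, e2, pvTok_cons, if_pos ⟨h1, by simp [h0]⟩]
    simp
  | case2 index cards hlt token hc ih =>
    have e1 : l.drop index = l[index] :: l.drop (index + 1) := List.drop_eq_getElem_cons hlt
    have hcond : ¬(l[index] = '1' ∧ (l.drop (index + 1)).head? = some '0') := by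
      rintro ⟨ha, hb⟩
      rw [List.head?_drop] at hb
      obtain ⟨hlt2, -⟩ := List.getElem?_eq_some_iff.mp hb
      exact hc ⟨ha, hlt2, hb⟩
    rw [ih, e1, pvTok_cons, if_neg hcond]
    simp
    rfl
  | case3 index cards hge =>
    rw [List.drop_eq_nil_of_le (by omega)]
    simp [pvTok]

lemma pvB_fold_eq (l : List Char) : ∀ cards pending,
    (let st := l.foldl pvBStep (cards, pending)
     if st.2 = true then st.1 ++ ["1"] else st.1)
    = cards ++ pvTok (if pending = true then '1' :: l else l) := by
  induction l with
  | nil =>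
    intro cards pending
    cases pending
    · simp [pvTok]
    · simp only [List.foldl_nil]
      simp [pvTok]
      decide
  | cons ch l' ih =>
    intro cards pending
    simp only [List.foldl_cons]
    cases pending with
    | false =>
      by_cases h1 : ch = '1'
      · subst h1
        rw [show pvBStep (cards, false) '1' = (cards, true) from by simp [pvBStep]]
        rw [ih cards true]
        simp
      · rw [show pvBStep (cards, false) ch
              = (cards ++ [String.ofList [PySem.Chars.upperChar ch]], false) from by
            simp [pvBStep, h1]]
        rw [ih _ false]
        simp only [Bool.false_eq_true, if_false]
        rw [pvTok_cons, if_neg (by simp [h1])]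
        simp
    | true =>
      by_cases h0 : ch = '0'
      · subst h0
        rw [show pvBStep (cards, true) '0' = (cards ++ ["10"], false) from by simp [pvBStep]]
        rw [ih _ false]
        simp [pvTok]
      · by_cases h1 : ch = '1'
        · subst h1
          rw [show pvBStep (cards, true) '1' = (cards ++ ["1"], true) from by
            simp [pvBStep]]
          rw [ih _ true]
          simp [pvTok]
          decide
        · rw [show pvBStep (cards, true) ch
                = (cards ++ ["1"] ++ [String.ofList [PySem.Chars.upperChar ch]], false) from by
              simp [pvBStep, h0, h1]]
          rw [ih _ false]
          simp only [Bool.false_eq_true, if_false, if_true]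
          rw [show pvTok ('1' :: ch :: l')
                = String.ofList [PySem.Chars.upperChar '1'] :: pvTok (ch :: l') from by
              simp [pvTok, h0]]
          rw [pvTok_cons, if_neg (by simp [h1])]
          simp
          decide

-- ===== VERDICT (by name: the statement is the Claim_ definition above) =====
theorem split_doudizhu_action_cards_py_spec : Claim_equal_split_doudizhu_action_cards_py := by
  intro s _
  unfold Spec_split_doudizhu_action_cards_py split_doudizhu_action_cards_py split_doudizhu_action_cards_py_alt
  simp only
  split
  · rfl
  · rw [pvALoop_eq, pvB_fold_eq]
    simp
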